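-- pv_equiv track=rewrite | github.com/Software-Cat/Python-Mini-Projects | MyCrypto/mycrypto.py | swap_pos
-- ===== SOURCE A (Python) =====
-- def swap_pos(intList, step): #7
--     """
--     Swap the character and the character after's positions with index increasing by step
--     """
--     if step < 2:
--         raise ValueError('Parameter step cannot be smaller than 2')
--     newIntList = []
--     thingsToSwap = []
--     for index in range(0, len(intList)-1, step):
--         thingsToSwap.append(index)
--     for index, item in enumerate(intList):
--         if index in thingsToSwap:
--             newIntList.append(intList[index + 1])
--         elif index-1 in thingsToSwap:
--             newIntList.append(intList[index - 1])
--         else: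
--             newIntList.append(item)
--     return newIntList
-- ===== SOURCE B (Python) =====
-- def swap_pos(intList, step):
--     if step < 2:
--         raise ValueError('Parameter step cannot be smaller than 2')
--     newIntList = list(intList)
--     for i in range(0, len(intList) - 1, step):
--         newIntList[i], newIntList[i + 1] = newIntList[i + 1], newIntList[i]
--     return newIntList
-- ===== Notes on version B (the rewrite author's own statement) =====
-- stated objective: simpler
-- what changed: B drops A's index table and per-element membership scan: it copies the list once and swaps the step-spaced adjacent pairs in place.
import Mathlib
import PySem

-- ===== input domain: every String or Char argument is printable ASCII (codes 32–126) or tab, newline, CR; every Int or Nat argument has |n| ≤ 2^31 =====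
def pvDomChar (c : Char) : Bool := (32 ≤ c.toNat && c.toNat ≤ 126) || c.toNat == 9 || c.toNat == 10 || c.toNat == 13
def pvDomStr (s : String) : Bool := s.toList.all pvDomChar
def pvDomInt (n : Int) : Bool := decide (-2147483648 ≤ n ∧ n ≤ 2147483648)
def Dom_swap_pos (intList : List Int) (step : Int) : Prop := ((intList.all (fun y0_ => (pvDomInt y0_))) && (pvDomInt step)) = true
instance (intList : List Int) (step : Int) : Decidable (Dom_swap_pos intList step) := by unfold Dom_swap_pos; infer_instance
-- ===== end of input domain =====

-- B replaces A's index table and per-element membership scan by one copy plus in-place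
-- swaps at the step-spaced positions (objective: simpler).

-- ===== PORT A =====
-- On step < 2 Python A raises ValueError; that input is excluded by Pre_swap_pos and the
-- port returns [] there. In the branches, intList[index+1] / intList[index-1] are always
-- in range when the branch is taken, so the total pyGetD (default 0) is exact there.
def swap_pos (intList : List Int) (step : Int) : List Int :=
  if step < 2 then []
  else
    let thingsToSwap :=
      (PySem.List.pyRange 0 ((intList.length : Int) - 1) step).foldl
        (fun acc index => acc ++ [index]) []
    (PySem.List.enumerate intList).foldl
      (fun newIntList p =>
        if p.1 ∈ thingsToSwap then newIntList ++ [PySem.List.pyGetD intList (p.1 + 1) 0]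
        else if p.1 - 1 ∈ thingsToSwap then newIntList ++ [PySem.List.pyGetD intList (p.1 - 1) 0]
        else newIntList ++ [p.2]) []

-- ===== PORT B =====
-- the tuple swap  newIntList[i], newIntList[i+1] = newIntList[i+1], newIntList[i]
-- (both indices are always in range, so the total pySetD/pyGetD forms are exact)
def swapAdj (l : List Int) (i : Int) : List Int :=
  let a := PySem.List.pyGetD l (i + 1) 0
  let b := PySem.List.pyGetD l i 0
  PySem.List.pySetD (PySem.List.pySetD l i a) (i + 1) b

def swap_pos_alt (intList : List Int) (step : Int) : List Int :=
  if step < 2 then []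
  else
    (PySem.List.pyRange 0 ((intList.length : Int) - 1) step).foldl swapAdj intList

-- ===== PRECONDITION & SPEC =====
-- Pre_ excludes exactly step < 2, where Python A raises ValueError.
def Pre_swap_pos (intList : List Int) (step : Int) : Prop := 2 ≤ step
instance (intList : List Int) (step : Int) : Decidable (Pre_swap_pos intList step) := by
  unfold Pre_swap_pos; infer_instance
def pvWitness_swap_pos : List Int × Int := ([5, 1, 4, 2, 3], 2)

def Spec_swap_pos (intList : List Int) (step : Int) (out : List Int) : Prop := out = swap_pos_alt intList step
instance (intList : List Int) (step : Int) (out : List Int) : Decidable (Spec_swap_pos intList step out) := by unfold Spec_swap_pos; infer_instance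

-- ===== CLAIM (what is proved, stated in full; the proofs are below) =====
def Claim_equal_swap_pos : Prop := ∀ (intList : List Int) (step : Int), Dom_swap_pos intList step → Pre_swap_pos intList step → Spec_swap_pos intList step (swap_pos intList step)

-- ===== LEMMAS AND PROOFS =====

theorem length_foldl_swapAdj (I : List Int) (l : List Int) :
    (I.foldl swapAdj l).length = l.length := by
  induction I generalizing l with
  | nil => rfl
  | cons i I ih =>
      simp only [List.foldl_cons, ih, swapAdj, PySem.List.length_pySetD]

-- one swap, read pointwise (all indices nonnegative)
theorem pyGetD_swapAdj (l : List Int) (i k : Int) (hi : 0 ≤ i)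
    (hi1 : i + 1 < (l.length : Int)) (hk : 0 ≤ k) :
    PySem.List.pyGetD (swapAdj l i) k 0 =
      if k = i then PySem.List.pyGetD l (i + 1) 0
      else if k = i + 1 then PySem.List.pyGetD l i 0
      else PySem.List.pyGetD l k 0 := by
  obtain ⟨ni, rfl⟩ : ∃ n : Nat, (n : Int) = i := ⟨i.toNat, Int.toNat_of_nonneg hi⟩
  obtain ⟨nk, rfl⟩ : ∃ n : Nat, (n : Int) = k := ⟨k.toNat, Int.toNat_of_nonneg hk⟩
  have hni1 : ni + 1 < l.length := by exact_mod_cast hi1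
  have h1 : ((ni : Int) + 1) = ((ni + 1 : Nat) : Int) := by push_cast; ring
  simp only [swapAdj, h1]
  rw [PySem.List.pyGetD_pySetD_natCast _ (ni + 1) nk _ _
        (by simpa [PySem.List.length_pySetD] using hni1),
      PySem.List.pyGetD_pySetD_natCast _ ni nk _ _ (by omega)]
  by_cases h : nk = ni + 1
  · subst h; simp
  · by_cases h' : nk = ni
    · subst h'; simp
    · simp [h, h', show ¬ ((nk : Int) = (ni : Int) + 1) from by exact_mod_cast h]

-- folding disjoint adjacent swaps, read pointwise
theorem pyGetD_foldl_swapAdj (I : List Int) (l : List Int)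
    (hp : I.Pairwise (fun a b => a + 2 ≤ b))
    (hb : ∀ i ∈ I, 0 ≤ i ∧ i + 1 < (l.length : Int)) :
    ∀ j : Nat,
      PySem.List.pyGetD (I.foldl swapAdj l) (j : Int) 0 =
        if (j : Int) ∈ I then PySem.List.pyGetD l ((j : Int) + 1) 0
        else if (j : Int) - 1 ∈ I then PySem.List.pyGetD l ((j : Int) - 1) 0
        else PySem.List.pyGetD l (j : Int) 0 := by
  induction I generalizing l with
  | nil => intro j; simp
  | cons i I ih =>
      intro j
      obtain ⟨hi0, hi1⟩ := hb i (List.mem_cons_self)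
      have hsep : ∀ x ∈ I, i + 2 ≤ x := fun x hx => (List.pairwise_cons.mp hp).1 x hx
      have hb' : ∀ x ∈ I, 0 ≤ x ∧ x + 1 < ((swapAdj l i).length : Int) := by
        intro x hx
        have := hb x (List.mem_cons_of_mem _ hx)
        simpa [swapAdj, PySem.List.length_pySetD] using this
      have key := ih (swapAdj l i) (List.pairwise_cons.mp hp).2 hb' j
      simp only [List.foldl_cons]
      rw [key]
      by_cases h1 : ((j : Int)) ∈ I
      · have s1 : i + 2 ≤ (j : Int) := hsep _ h1
        rw [if_pos h1, if_pos (List.mem_cons_of_mem i h1),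
            pyGetD_swapAdj l i ((j : Int) + 1) hi0 hi1 (by omega),
            if_neg (by omega), if_neg (by omega)]
      · rw [if_neg h1]
        by_cases h2 : ((j : Int)) = i
        · rw [if_pos (show ((j : Int)) ∈ i :: I by simp [h2]),
              if_neg (show ¬(((j : Int)) - 1 ∈ I) from fun h => by have := hsep _ h; omega),
              pyGetD_swapAdj l i ((j : Int)) hi0 hi1 (by omega), if_pos h2, h2]
        · rw [if_neg (show ¬(((j : Int)) ∈ i :: I) by simp [List.mem_cons, h1, h2])]
          by_cases h3 : ((j : Int)) - 1 ∈ I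
          · have s3 := hsep _ h3
            rw [if_pos h3, if_pos (List.mem_cons_of_mem i h3),
                pyGetD_swapAdj l i ((j : Int) - 1) hi0 hi1 (by omega),
                if_neg (by omega), if_neg (by omega)]
          · rw [if_neg h3]
            by_cases h4 : ((j : Int)) - 1 = i
            · rw [if_pos (show ((j : Int)) - 1 ∈ i :: I by simp [h4]),
                  pyGetD_swapAdj l i ((j : Int)) hi0 hi1 (by omega),
                  if_neg h2, if_pos (by omega), h4]
            · rw [if_neg (show ¬(((j : Int)) - 1 ∈ i :: I) by simp [List.mem_cons, h3, h4]),
                  pyGetD_swapAdj l i ((j : Int)) hi0 hi1 (by omega),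
                  if_neg h2, if_neg (by omega)]

-- the element A's enumeration loop appends at position p
def aBody (intList : List Int) (step : Int) (p : Int × Int) : Int :=
  if p.1 ∈ PySem.List.pyRange 0 ((intList.length : Int) - 1) step then
    PySem.List.pyGetD intList (p.1 + 1) 0
  else if p.1 - 1 ∈ PySem.List.pyRange 0 ((intList.length : Int) - 1) step then
    PySem.List.pyGetD intList (p.1 - 1) 0
  else p.2

-- A's output as a map over the enumeration
theorem swap_pos_eq_map (intList : List Int) (step : Int) (h : ¬ step < 2) :
    swap_pos intList step =
      (PySem.List.enumerate intList).map (aBody intList step) := by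
  unfold swap_pos
  rw [if_neg h]
  simp only [PySem.List.foldl_append_singleton, List.nil_append]
  rw [PySem.List.foldl_congr_mem (PySem.List.enumerate intList) _
        (fun acc x => acc ++ [aBody intList step x]) []
        (by intro acc p _; beta_reduce; unfold aBody; split_ifs <;> rfl),
      PySem.List.foldl_append_singleton_eq_map (aBody intList step), List.nil_append]

-- the step-spaced swap positions are pairwise ≥ 2 apart
theorem pyRange_pairwise_sep (n step : Int) (hs : 2 ≤ step) :
    (PySem.List.pyRange 0 (n - 1) step).Pairwise (fun a b => a + 2 ≤ b) := by
  rw [PySem.List.pyRange_of_pos 0 (n - 1) (by omega)]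
  rw [List.pairwise_map]
  refine List.Pairwise.imp ?_ List.pairwise_lt_range
  intro a b hab
  have : (a : Int) + 1 ≤ (b : Int) := by exact_mod_cast hab
  nlinarith

theorem swap_pos_spec' (intList : List Int) (step : Int) (hs : 2 ≤ step) :
    swap_pos intList step = swap_pos_alt intList step := by
  have hns : ¬ step < 2 := by omega
  have hmem : ∀ x ∈ PySem.List.pyRange 0 ((intList.length : Int) - 1) step,
      0 ≤ x ∧ x + 1 < (intList.length : Int) := by
    intro x hx
    rw [PySem.List.mem_pyRange_iff_of_pos (by omega)] at hx
    omega
  rw [swap_pos_eq_map intList step hns]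
  unfold swap_pos_alt
  rw [if_neg hns]
  apply List.ext_getElem
  · simp [length_foldl_swapAdj, PySem.List.length_enumerate]
  · intro j h1 h2
    have hjlen : j < intList.length := by
      simpa [PySem.List.length_enumerate] using h1
    have hfold := pyGetD_foldl_swapAdj
      (PySem.List.pyRange 0 ((intList.length : Int) - 1) step) intList
      (pyRange_pairwise_sep (intList.length : Int) step hs) hmem j
    have hget := PySem.List.pyGetD_eq_getElem
      ((PySem.List.pyRange 0 ((intList.length : Int) - 1) step).foldl swapAdj intList) 0
      (i := (j : Int)) (Int.natCast_nonneg j)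
      (by rw [length_foldl_swapAdj]; exact_mod_cast hjlen)
    simp only [Int.toNat_natCast] at hget
    rw [List.getElem_map, PySem.List.getElem_enumerate intList 0 j
          (by simpa [PySem.List.length_enumerate] using hjlen)]
    rw [← hget, hfold]
    unfold aBody
    simp only [zero_add]
    split_ifs with hc1 hc2
    · rfl
    · rfl
    · rw [PySem.List.pyGetD_natCast]
      simp [List.getD_eq_getElem?_getD, List.getElem?_eq_getElem hjlen]

-- ===== VERDICT (by name: the statement is the Claim_ definition above) =====
theorem swap_pos_spec : Claim_equal_swap_pos := by
  intro intList step _ hpre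
  unfold Spec_swap_pos
  exact swap_pos_spec' intList step hpre
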